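-- pv_equiv track=rewrite | github.com/RationAI/ciao | ciao/utils/segmentation.py | build_fast_adjacency_list
-- ===== SOURCE A (Python) =====
-- def build_fast_adjacency_list(hex_to_id, max_id):
--     """Vytvoří 'static adjacency list' optimalizovaný pro rychlé čtení.
--
--     Args:
--         hex_to_id: Dict mapující (q, r) -> int_id (0 až N-1)
--         max_id: Celkový počet segmentů (N)
--
--     Returns:
--         adj_list: Tuple of Tuples.
--                   adj_list[5] vrátí např. (4, 6, 12) - sousedy segmentu 5.
--     """
--     # Inicializujeme prázdné listy pro každé ID
--     # Používáme list listů pro konstrukci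
--     temp_adj = [[] for _ in range(max_id)]
--
--     # Offsets pro sousedy (axial coords)
--     hex_neighbors = [(+1, 0), (+1, -1), (0, -1), (-1, 0), (-1, +1), (0, +1)]
--
--     for (q, r), seg_id in hex_to_id.items():
--         for dq, dr in hex_neighbors:
--             neighbor_key = (q + dq, r + dr)
--
--             # Pokud soused existuje (je uvnitř obrázku)
--             if neighbor_key in hex_to_id:
--                 neighbor_id = hex_to_id[neighbor_key]
--                 temp_adj[seg_id].append(neighbor_id)
--
--     # Konverze na tuple of tuples pro maximální rychlost čtení a paměťovou efektivitu
--     # Seřadíme sousedy (volitelné, ale dobré pro determinismus)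
--     final_adj = tuple(tuple(sorted(neighbors)) for neighbors in temp_adj)
--
--     return final_adj
-- ===== SOURCE B (Python) =====
-- def build_fast_adjacency_list(hex_to_id, max_id):
--     """Edge-list formulation: visit each adjacency once via the three 'forward'
--     offsets, emit both directed edges, sort the edge list by source id, and
--     slice it into per-id groups with one linear scan."""
--     half = ((1, 0), (1, -1), (0, 1))
--     edges = []
--     for (q, r), sid in hex_to_id.items():
--         for dq, dr in half:
--             nid = hex_to_id.get((q + dq, r + dr))
--             if nid is not None:
--                 edges.append((sid, nid))
--                 edges.append((nid, sid))
--     edges.sort(key=lambda e: e[0])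
--     out = []
--     k = 0
--     for i in range(max_id):
--         while k < len(edges) and edges[k][0] < i:
--             k += 1
--         grp = []
--         while k < len(edges) and edges[k][0] == i:
--             grp.append(edges[k][1])
--             k += 1
--         out.append(tuple(sorted(grp)))
--     return tuple(out)
-- ===== Notes on version B (the rewrite author's own statement) =====
-- stated objective: alternative
-- what changed: Replaces A's per-cell scatter over all six offsets into index buckets by an edge-list algorithm: each undirected adjacency is discovered once via the three forward offsets and emitted as two directed edges, then the edge list is sorted by source id and sliced into per-id groups with one linear scan.
-- outside the precondition, e.g. on build_fast_adjacency_list({(0, 0): -1, (1, 0): 0}, 2): A returns ((-1,), (0,)), B returns ((-1,), ())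
import Mathlib
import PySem

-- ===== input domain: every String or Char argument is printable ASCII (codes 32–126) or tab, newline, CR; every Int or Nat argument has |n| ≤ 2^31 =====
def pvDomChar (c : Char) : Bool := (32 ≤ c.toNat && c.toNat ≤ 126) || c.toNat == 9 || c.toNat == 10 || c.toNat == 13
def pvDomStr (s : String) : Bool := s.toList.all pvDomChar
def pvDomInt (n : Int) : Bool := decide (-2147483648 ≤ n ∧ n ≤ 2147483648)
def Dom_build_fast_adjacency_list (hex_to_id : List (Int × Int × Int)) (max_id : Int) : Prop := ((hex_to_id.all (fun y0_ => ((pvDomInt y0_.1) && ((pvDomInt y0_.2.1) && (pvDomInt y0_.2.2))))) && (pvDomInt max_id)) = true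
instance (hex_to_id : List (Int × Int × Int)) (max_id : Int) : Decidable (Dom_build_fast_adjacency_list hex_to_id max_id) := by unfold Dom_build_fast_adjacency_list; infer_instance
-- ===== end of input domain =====

-- B replaces A's per-cell scatter over all six offsets into index buckets by an edge-list
-- algorithm: every undirected adjacency is found once via the three forward offsets and emitted
-- as two directed edges; the edge list is sorted by source id and sliced into per-id groups by
-- one linear scan (alternative decomposition, similar cost).

-- ===== PORT A =====
-- shared data helpers: the neighbor offsets and the dict the Python harness passes in
def pvHexNeighbors : List (Int × Int) := [(1, 0), (1, -1), (0, -1), (-1, 0), (-1, 1), (0, 1)]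

def pvToDict (hex_to_id : List (Int × Int × Int)) : PySem.Dict (Int × Int) Int :=
  PySem.Dict.ofList (hex_to_id.map (fun p => ((p.1, p.2.1), p.2.2)))

-- temp_adj[i].append(x): Python's negative-index rule; out of range = IndexError, excluded by Pre_
def pvAppendAt (t : List (List Int)) (i : Int) (x : Int) : List (List Int) :=
  let j : Int := if i < 0 then i + t.length else i
  if 0 ≤ j ∧ j < t.length then t.set j.toNat (t.getD j.toNat [] ++ [x]) else t

def build_fast_adjacency_list (hex_to_id : List (Int × Int × Int)) (max_id : Int) : List (List Int) :=
  let d := pvToDict hex_to_id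
  let temp := d.items.foldl (fun t kv =>
      pvHexNeighbors.foldl (fun t off =>
        match d.get? (kv.1.1 + off.1, kv.1.2 + off.2) with
        | some nid => pvAppendAt t kv.2 nid
        | none => t) t)
    ((PySem.List.pyRange 0 max_id 1).map (fun _ => ([] : List Int)))
  temp.map (fun ns => PySem.List.sorted ns (fun x => x) false)

-- ===== PORT B =====
-- the three forward offsets; their negations give the other three of the six
def pvHalfOffsets : List (Int × Int) := [(1, 0), (1, -1), (0, 1)]

-- the edge-building loop: each detected adjacency appends both directed edges
def pvEdges (d : PySem.Dict (Int × Int) Int) : List (Int × Int) :=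
  d.items.foldl (fun es kv =>
    pvHalfOffsets.foldl (fun es off =>
      match d.get? (kv.1.1 + off.1, kv.1.2 + off.2) with
      | some nid => es ++ [(kv.2, nid), (nid, kv.2)]
      | none => es) es) []

-- loop body of B's grouping scan: advance past smaller sources, take the group, sort it
def pvGroupStep (acc : List (List Int) × List (Int × Int)) (i : Int) :
    List (List Int) × List (Int × Int) :=
  (acc.1 ++ [PySem.List.sorted
      (((acc.2.dropWhile (fun e => decide (e.1 < i))).takeWhile (fun e => e.1 == i)).map
        (fun e => e.2)) (fun x => x) false],
   (acc.2.dropWhile (fun e => decide (e.1 < i))).dropWhile (fun e => e.1 == i))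

def build_fast_adjacency_list_alt (hex_to_id : List (Int × Int × Int)) (max_id : Int) : List (List Int) :=
  ((PySem.List.pyRange 0 max_id 1).foldl pvGroupStep
    (([] : List (List Int)),
     PySem.List.sorted (pvEdges (pvToDict hex_to_id)) (fun e => e.1) false)).1

-- ===== PRECONDITION & SPEC =====
-- Pre_ restricts ids of coordinates that have a present neighbor to the documented domain
-- 0..max_id-1: ids ≥ max_id (or ≤ -max_id-1) make A raise IndexError at temp_adj[seg_id], and on a
-- negative id in [-max_id, -1] A returns an accidental wraparound merge into bucket max_id+id
-- (Python negative indexing) that B does not mirror (see cites); isolated out-of-range ids, which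
-- append nothing, stay inside the claim.
def Pre_build_fast_adjacency_list (hex_to_id : List (Int × Int × Int)) (max_id : Int) : Prop :=
  ∀ kv ∈ (pvToDict hex_to_id).items,
    (∃ off ∈ pvHexNeighbors,
      (pvToDict hex_to_id).contains (kv.1.1 + off.1, kv.1.2 + off.2) = true) →
    0 ≤ kv.2 ∧ kv.2 < max_id
instance (hex_to_id : List (Int × Int × Int)) (max_id : Int) : Decidable (Pre_build_fast_adjacency_list hex_to_id max_id) := by unfold Pre_build_fast_adjacency_list; infer_instance

def pvWitness_build_fast_adjacency_list : (List (Int × Int × Int)) × Int := ([(0, 0, 0), (1, 0, 1)], 2)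

def Spec_build_fast_adjacency_list (hex_to_id : List (Int × Int × Int)) (max_id : Int) (out : List (List Int)) : Prop := out = build_fast_adjacency_list_alt hex_to_id max_id
instance (hex_to_id : List (Int × Int × Int)) (max_id : Int) (out : List (List Int)) : Decidable (Spec_build_fast_adjacency_list hex_to_id max_id out) := by unfold Spec_build_fast_adjacency_list; infer_instance

-- ===== CLAIM (what is proved, stated in full; the proofs are below) =====
def Claim_equal_build_fast_adjacency_list : Prop := ∀ (hex_to_id : List (Int × Int × Int)) (max_id : Int), Dom_build_fast_adjacency_list hex_to_id max_id → Pre_build_fast_adjacency_list hex_to_id max_id → Spec_build_fast_adjacency_list hex_to_id max_id (build_fast_adjacency_list hex_to_id max_id)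

-- ===== LEMMAS AND PROOFS =====

-- ids of the present neighbors of (q, r), over all six offsets (A's per-cell contribution)
def pvGather (d : PySem.Dict (Int × Int) Int) (q r : Int) : List Int :=
  pvHexNeighbors.filterMap (fun off => d.get? (q + off.1, r + off.2))

-- A's inner loop over the offsets is the fold over the gathered neighbor ids
theorem pv_inner_aux (d : PySem.Dict (Int × Int) Int) (q r v : Int)
    (os : List (Int × Int)) (t : List (List Int)) :
    os.foldl (fun t off =>
        match d.get? (q + off.1, r + off.2) with
        | some nid => pvAppendAt t v nid
        | none => t) t
      = (os.filterMap (fun off => d.get? (q + off.1, r + off.2))).foldl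
          (fun t nid => pvAppendAt t v nid) t := by
  induction os generalizing t with
  | nil => rfl
  | cons o os ih =>
      simp only [List.foldl_cons, List.filterMap_cons]
      cases d.get? (q + o.1, r + o.2) <;> simp [ih]

theorem pv_inner (d : PySem.Dict (Int × Int) Int) (q r v : Int) (t : List (List Int)) :
    pvHexNeighbors.foldl (fun t off =>
        match d.get? (q + off.1, r + off.2) with
        | some nid => pvAppendAt t v nid
        | none => t) t
      = (pvGather d q r).foldl (fun t nid => pvAppendAt t v nid) t :=
  pv_inner_aux d q r v pvHexNeighbors t

theorem pv_set_getD_self (t : List (List Int)) (n : Nat) (h : n < t.length) :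
    t.set n (t.getD n []) = t := by
  apply List.ext_getElem (by simp)
  intro i h1 h2
  simp [List.getElem_set, List.getD_eq_getElem?_getD, List.getElem?_eq_getElem h]

theorem pv_appendAt_nonneg (t : List (List Int)) (n : Nat) (h : n < t.length) (x : Int) :
    pvAppendAt t (n : Int) x = t.set n (t.getD n [] ++ [x]) := by
  unfold pvAppendAt
  have h0 : ¬ ((n : Int) < 0) := by omega
  simp only [h0, if_false]
  rw [if_pos (by constructor <;> omega)]
  simp

theorem pv_foldl_appendAt (xs : List Int) (t : List (List Int)) (n : Nat) (h : n < t.length) :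
    xs.foldl (fun t x => pvAppendAt t (n : Int) x) t = t.set n (t.getD n [] ++ xs) := by
  induction xs generalizing t with
  | nil =>
      simp only [List.foldl_nil, List.append_nil]
      exact (pv_set_getD_self t n h).symm
  | cons x xs ih =>
      simp only [List.foldl_cons]
      rw [pv_appendAt_nonneg t n h x, ih _ (by simp [h]),
        List.set_set]
      congr 1
      have : (t.set n (t.getD n [] ++ [x])).getD n [] = t.getD n [] ++ [x] := by
        simp [List.getD_eq_getElem?_getD, List.getElem?_set_self, h]
      rw [this]; simp

-- A's outer loop, characterised bucket by bucket: bucket n collects, in items order, the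
-- gathered neighbor ids of every coordinate whose id is n
theorem pv_outer (d : PySem.Dict (Int × Int) Int) (its : List ((Int × Int) × Int))
    (t : List (List Int))
    (hgb : ∀ kv ∈ its, pvGather d kv.1.1 kv.1.2 = [] ∨
      (0 ≤ kv.2 ∧ kv.2 < (t.length : Int))) :
    (its.foldl (fun t kv =>
        pvHexNeighbors.foldl (fun t off =>
          match d.get? (kv.1.1 + off.1, kv.1.2 + off.2) with
          | some nid => pvAppendAt t kv.2 nid
          | none => t) t) t).length = t.length ∧
    ∀ n : Nat, n < t.length →
      (its.foldl (fun t kv =>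
        pvHexNeighbors.foldl (fun t off =>
          match d.get? (kv.1.1 + off.1, kv.1.2 + off.2) with
          | some nid => pvAppendAt t kv.2 nid
          | none => t) t) t)[n]? =
      some (t.getD n [] ++
        (its.filter (fun kv => kv.2 == (n : Int))).flatMap
          (fun kv => pvGather d kv.1.1 kv.1.2)) := by
  induction its generalizing t with
  | nil =>
      refine ⟨rfl, fun n hn => ?_⟩
      simp [List.getD_eq_getElem?_getD, List.getElem?_eq_getElem hn]
  | cons kv rest ih =>
      simp only [List.foldl_cons]
      rcases hgb kv List.mem_cons_self with hg | ⟨h0, hlt⟩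
      · rw [pv_inner, hg]
        simp only [List.foldl_nil]
        obtain ⟨hl, hval⟩ := ih t
          (fun kv' h' => hgb kv' (List.mem_cons_of_mem _ h'))
        refine ⟨hl, fun n hn => ?_⟩
        rw [hval n hn]
        by_cases hc : kv.2 = (n : Int)
        · rw [List.filter_cons_of_pos (by simp only [beq_iff_eq]; exact hc),
            List.flatMap_cons, hg, List.nil_append]
        · rw [List.filter_cons_of_neg (by simp only [beq_iff_eq]; exact hc)]
      · have hm : ((kv.2.toNat : Nat) : Int) = kv.2 := Int.toNat_of_nonneg h0
        have hmlen : kv.2.toNat < t.length := by omega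
        have ht' : (pvHexNeighbors.foldl (fun t off =>
              match d.get? (kv.1.1 + off.1, kv.1.2 + off.2) with
              | some nid => pvAppendAt t kv.2 nid
              | none => t) t)
            = t.set kv.2.toNat (t.getD kv.2.toNat [] ++ pvGather d kv.1.1 kv.1.2) := by
          rw [pv_inner, ← hm]
          exact pv_foldl_appendAt _ t kv.2.toNat hmlen
        rw [ht']
        have hlen' : (t.set kv.2.toNat (t.getD kv.2.toNat [] ++ pvGather d kv.1.1 kv.1.2)).length
            = t.length := by simp
        obtain ⟨hl, hval⟩ := ih _
          (fun kv' h' => by rw [hlen']; exact hgb kv' (List.mem_cons_of_mem _ h'))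
        rw [hlen'] at hl
        refine ⟨hl, fun n hn => ?_⟩
        rw [hval n (by rw [hlen']; exact hn)]
        by_cases hn2 : kv.2 = (n : Int)
        · have hnm : n = kv.2.toNat := by omega
          subst hnm
          rw [List.filter_cons_of_pos (by simp only [beq_iff_eq]; exact hn2)]
          have hgd : (t.set kv.2.toNat (t.getD kv.2.toNat [] ++ pvGather d kv.1.1 kv.1.2)).getD
              kv.2.toNat [] = t.getD kv.2.toNat [] ++ pvGather d kv.1.1 kv.1.2 := by
            simp [List.getD_eq_getElem?_getD, List.getElem?_set_self, hmlen]
          rw [hgd, List.flatMap_cons, List.append_assoc]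
        · have hmn : kv.2.toNat ≠ n := by omega
          rw [List.filter_cons_of_neg (by simp only [beq_iff_eq]; exact hn2)]
          have hgd : (t.set kv.2.toNat (t.getD kv.2.toNat [] ++ pvGather d kv.1.1 kv.1.2)).getD
              n [] = t.getD n [] := by
            simp [List.getD_eq_getElem?_getD, List.getElem?_set_ne hmn]
          rw [hgd]

-- ---------- B side ----------

def pvNegOffsets : List (Int × Int) := [(-1, 0), (-1, 1), (0, -1)]

-- per-item edge contribution, per-item direct / reverse / negative-offset bucket contributions
def pvEdgeF (d : PySem.Dict (Int × Int) Int) (kv : (Int × Int) × Int) : List (Int × Int) :=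
  pvHalfOffsets.flatMap (fun off =>
    match d.get? (kv.1.1 + off.1, kv.1.2 + off.2) with
    | some nid => [(kv.2, nid), (nid, kv.2)]
    | none => [])

def pvDir (d : PySem.Dict (Int × Int) Int) (n : Int) (kv : (Int × Int) × Int) : List Int :=
  pvHalfOffsets.flatMap (fun off =>
    match d.get? (kv.1.1 + off.1, kv.1.2 + off.2) with
    | some nid => if kv.2 == n then [nid] else []
    | none => [])

def pvRev (d : PySem.Dict (Int × Int) Int) (n : Int) (kv : (Int × Int) × Int) : List Int :=
  pvHalfOffsets.flatMap (fun off =>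
    match d.get? (kv.1.1 + off.1, kv.1.2 + off.2) with
    | some nid => if nid == n then [kv.2] else []
    | none => [])

def pvNegDir (d : PySem.Dict (Int × Int) Int) (n : Int) (kv : (Int × Int) × Int) : List Int :=
  pvNegOffsets.flatMap (fun off =>
    match d.get? (kv.1.1 + off.1, kv.1.2 + off.2) with
    | some nid => if kv.2 == n then [nid] else []
    | none => [])

-- adjacency matches over a given offset list, as (item, offset, neighbor id) triples
def pvMatches (d : PySem.Dict (Int × Int) Int) (os : List (Int × Int)) :
    List (((Int × Int) × Int) × (Int × Int) × Int) :=
  d.items.flatMap (fun kv => os.filterMap (fun off =>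
    (d.get? (kv.1.1 + off.1, kv.1.2 + off.2)).map (fun nid => (kv, off, nid))))

-- the reversal bijection on matches
def pvFlip (t : ((Int × Int) × Int) × (Int × Int) × Int) :
    ((Int × Int) × Int) × (Int × Int) × Int :=
  (((t.1.1.1 + t.2.1.1, t.1.1.2 + t.2.1.2), t.2.2), (-t.2.1.1, -t.2.1.2), t.1.2)

-- generic list plumbing
theorem pv_foldl_append {α β : Type} (l : List α) (f : α → List β) (es : List β) :
    l.foldl (fun es a => es ++ f a) es = es ++ l.flatMap f := by
  induction l generalizing es with
  | nil => simp
  | cons a l ih => simp [ih]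

theorem pv_filter_map_flatMap {α β γ : Type} (l : List α) (f : α → List β)
    (p : β → Bool) (g : β → γ) :
    ((l.flatMap f).filter p).map g = l.flatMap (fun a => ((f a).filter p).map g) := by
  induction l with
  | nil => simp
  | cons a l ih => simp [List.filter_append, ih]

theorem pv_filter_flatMap {α β : Type} (l : List α) (p : α → Bool) (f : α → List β) :
    (l.filter p).flatMap f = l.flatMap (fun a => if p a then f a else []) := by
  induction l with
  | nil => simp
  | cons a l ih => by_cases h : p a <;> simp [List.filter_cons, h, ih]

theorem pv_flatMap_congr_perm {α β : Type} (l : List α) (f g : α → List β)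
    (h : ∀ a ∈ l, List.Perm (f a) (g a)) : List.Perm (l.flatMap f) (l.flatMap g) := by
  induction l with
  | nil => simp
  | cons a l ih =>
      simp only [List.flatMap_cons]
      exact (h a List.mem_cons_self).append (ih (fun b hb => h b (List.mem_cons_of_mem _ hb)))

theorem pv_flatMap_append_perm {α β : Type} (l : List α) (f g : α → List β) :
    List.Perm (l.flatMap (fun a => f a ++ g a)) (l.flatMap f ++ l.flatMap g) := by
  induction l with
  | nil => simp
  | cons a l ih =>
      simp only [List.flatMap_cons]
      refine (ih.append_left (f a ++ g a)).trans ?_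
      have h := (List.perm_append_comm_assoc (g a) (l.flatMap f) (l.flatMap g)).append_left (f a)
      simpa [List.append_assoc] using h

theorem pv_nodup_flatMap {α β : Type} (l : List α) (f : α → List β) (hl : l.Nodup)
    (hf : ∀ a ∈ l, (f a).Nodup)
    (hdisj : ∀ a ∈ l, ∀ b ∈ l, a ≠ b → ∀ x ∈ f a, x ∉ f b) : (l.flatMap f).Nodup := by
  induction l with
  | nil => simp
  | cons a l ih =>
      rw [List.nodup_cons] at hl
      rw [List.flatMap_cons]
      refine List.Nodup.append (hf a List.mem_cons_self)
        (ih hl.2 (fun b hb => hf b (List.mem_cons_of_mem _ hb))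
          (fun b hb c hc hbc => hdisj b (List.mem_cons_of_mem _ hb) c (List.mem_cons_of_mem _ hc) hbc))
        ?_
      intro x hx hx'
      rw [List.mem_flatMap] at hx'
      obtain ⟨b, hb, hxb⟩ := hx'
      exact hdisj a List.mem_cons_self b (List.mem_cons_of_mem _ hb)
        (fun h => hl.1 (h ▸ hb)) x hx hxb

theorem pv_filterMap_tag {α : Type} (os : List α) (o : α → Option Int) :
    os.filterMap (fun off => (o off).map (fun _ => off)) = os.filter (fun off => (o off).isSome) := by
  induction os with
  | nil => rfl
  | cons a os ih =>
      rw [List.filterMap_cons, List.filter_cons]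
      cases h : o a <;> simp [h, ih]

-- the edge-building fold, as a flatMap
theorem pv_edges_eq_flatMap (d : PySem.Dict (Int × Int) Int) :
    pvEdges d = d.items.flatMap (pvEdgeF d) := by
  have hstep : ∀ (kv : (Int × Int) × Int) (es : List (Int × Int)),
      pvHalfOffsets.foldl (fun es off =>
        match d.get? (kv.1.1 + off.1, kv.1.2 + off.2) with
        | some nid => es ++ [(kv.2, nid), (nid, kv.2)]
        | none => es) es
      = es ++ pvEdgeF d kv := by
    intro kv es
    unfold pvEdgeF
    generalize pvHalfOffsets = os
    induction os generalizing es with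
    | nil => simp
    | cons o os ih =>
        simp only [List.foldl_cons, List.flatMap_cons]
        cases d.get? (kv.1.1 + o.1, kv.1.2 + o.2) <;> simp [ih]
  unfold pvEdges
  rw [show (fun (es : List (Int × Int)) (kv : (Int × Int) × Int) =>
      pvHalfOffsets.foldl (fun es off =>
        match d.get? (kv.1.1 + off.1, kv.1.2 + off.2) with
        | some nid => es ++ [(kv.2, nid), (nid, kv.2)]
        | none => es) es)
    = (fun es kv => es ++ pvEdgeF d kv) from funext fun es => funext fun kv => hstep kv es]
  rw [pv_foldl_append]
  simp

-- sorted-prefix lemmas for the scan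
theorem pv_dropWhile_lt (E : List (Int × Int)) (hp : E.Pairwise (fun a b => a.1 ≤ b.1)) (i : Int) :
    E.dropWhile (fun e => decide (e.1 < i)) = E.filter (fun e => decide (i ≤ e.1)) := by
  induction E with
  | nil => rfl
  | cons e E ih =>
      rw [List.pairwise_cons] at hp
      by_cases h : e.1 < i
      · rw [List.dropWhile_cons_of_pos (by simpa using h),
          List.filter_cons_of_neg (by simpa using (by omega : ¬ i ≤ e.1)), ih hp.2]
      · rw [List.dropWhile_cons_of_neg (by simpa using h),
          List.filter_cons_of_pos (by simpa using (by omega : i ≤ e.1))]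
        rw [List.filter_eq_self.mpr]
        intro x hx
        have := hp.1 x hx
        simp only [decide_eq_true_eq]
        omega

theorem pv_takeWhile_eq (E : List (Int × Int)) (hp : E.Pairwise (fun a b => a.1 ≤ b.1))
    (i : Int) (hlow : ∀ e ∈ E, i ≤ e.1) :
    E.takeWhile (fun e => e.1 == i) = E.filter (fun e => e.1 == i) ∧
    E.dropWhile (fun e => e.1 == i) = E.filter (fun e => decide (i + 1 ≤ e.1)) := by
  induction E with
  | nil => exact ⟨rfl, rfl⟩
  | cons e E ih =>
      rw [List.pairwise_cons] at hp
      have hlow' : ∀ x ∈ E, i ≤ x.1 := fun x hx => hlow x (List.mem_cons_of_mem _ hx)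
      by_cases h : e.1 = i
      · obtain ⟨ht, hd⟩ := ih hp.2 hlow'
        constructor
        · rw [List.takeWhile_cons_of_pos (by simpa using h),
            List.filter_cons_of_pos (by simpa using h), ht]
        · rw [List.dropWhile_cons_of_pos (by simpa using h),
            List.filter_cons_of_neg (by simpa using (by omega : ¬ i + 1 ≤ e.1)), hd]
      · have hgt : i + 1 ≤ e.1 := by have := hlow e List.mem_cons_self; omega
        constructor
        · rw [List.takeWhile_cons_of_neg (by simpa using h),
            List.filter_cons_of_neg (by simpa using h)]
          rw [eq_comm, List.filter_eq_nil_iff]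
          intro x hx
          have := hp.1 x hx
          simp only [beq_iff_eq]
          omega
        · rw [List.dropWhile_cons_of_neg (by simpa using h),
            List.filter_cons_of_pos (by simpa using hgt)]
          rw [List.filter_eq_self.mpr]
          intro x hx
          have := hp.1 x hx
          simp only [decide_eq_true_eq]
          omega

theorem pv_scan (N : Nat) (s : Int) (E : List (Int × Int))
    (hp : E.Pairwise (fun a b => a.1 ≤ b.1)) (hlow : ∀ e ∈ E, s ≤ e.1)
    (acc : List (List Int)) :
    (PySem.List.pyRange s (s + N) 1).foldl pvGroupStep (acc, E)
      = (acc ++ (List.range N).map (fun (j : Nat) =>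
            PySem.List.sorted ((E.filter (fun e => e.1 == s + (j : Int))).map (fun e => e.2))
              (fun x => x) false),
         E.filter (fun e => decide (s + N ≤ e.1))) := by
  induction N generalizing s E acc with
  | zero =>
      rw [PySem.List.pyRange_one_eq_nil (by push_cast; omega)]
      simp only [List.foldl_nil, List.range_zero, List.map_nil, List.append_nil]
      rw [List.filter_eq_self.mpr (by
        intro x hx; have := hlow x hx; simp only [decide_eq_true_eq]; push_cast; omega)]
  | succ N ih =>
      rw [PySem.List.pyRange_one_cons (by push_cast; omega), List.foldl_cons]
      have hrest : E.dropWhile (fun e => decide (e.1 < s)) = E := by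
        rw [pv_dropWhile_lt E hp s, List.filter_eq_self.mpr]
        intro x hx; simpa using hlow x hx
      obtain ⟨ht, hd⟩ := pv_takeWhile_eq E hp s hlow
      have hstep : pvGroupStep (acc, E) s
          = (acc ++ [PySem.List.sorted ((E.filter (fun e => e.1 == s)).map (fun e => e.2))
              (fun x => x) false],
             E.filter (fun e => decide (s + 1 ≤ e.1))) := by
        unfold pvGroupStep
        rw [show (acc, E).2 = E from rfl, hrest, ht, hd]
      rw [hstep]
      have hE' : (E.filter (fun e => decide (s + 1 ≤ e.1))).Pairwise (fun a b => a.1 ≤ b.1) :=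
        hp.filter _
      have hlow' : ∀ e ∈ E.filter (fun e => decide (s + 1 ≤ e.1)), s + 1 ≤ e.1 := by
        intro e he
        have := List.of_mem_filter he
        simpa using this
      have hrange : PySem.List.pyRange (s + 1) (s + ((N : Int) + 1)) 1
          = PySem.List.pyRange (s + 1) ((s + 1) + (N : Int)) 1 := by
        congr 1; omega
      rw [show ((N + 1 : Nat) : Int) = (N : Int) + 1 by push_cast; ring, hrange,
        ih (s + 1) _ hE' hlow' _]
      simp only [Prod.mk.injEq]
      constructor
      · rw [List.append_assoc, List.singleton_append, List.range_succ_eq_map, List.map_cons,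
          List.map_map]
        congr 2
        · congr 3
          push_cast
          ring
        · apply List.map_congr_left
          intro j _
          congr 1
          rw [List.filter_filter]
          congr 1
          apply List.filter_congr
          intro e _
          by_cases hc : e.1 = s + 1 + (j : Int)
          · have h1 : (e.1 == s + 1 + (j : Int)) = true := by simpa using hc
            have h2 : decide (s + 1 ≤ e.1) = true := by rw [decide_eq_true_eq]; omega
            have h3 : (e.1 == s + ((Nat.succ j : Nat) : Int)) = true := by
              rw [beq_iff_eq]; push_cast; omega
            rw [h1, h2, h3]; rfl
          · have h1 : (e.1 == s + 1 + (j : Int)) = false := by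
              rw [beq_eq_false_iff_ne]; exact hc
            have h3 : (e.1 == s + ((Nat.succ j : Nat) : Int)) = false := by
              rw [beq_eq_false_iff_ne]; push_cast; omega
            rw [h1, h3]; simp
      · rw [List.filter_filter]
        apply List.filter_congr
        intro e _
        by_cases hc : s + 1 + (N : Int) ≤ e.1
        · have h1 : decide (s + 1 + (N : Int) ≤ e.1) = true := by simpa using hc
          have h2 : decide (s + 1 ≤ e.1) = true := by rw [decide_eq_true_eq]; omega
          have h3 : decide (s + ((N : Int) + 1) ≤ e.1) = true := by
            rw [decide_eq_true_eq]; omega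
          rw [h1, h2, h3]; rfl
        · have h1 : decide (s + 1 + (N : Int) ≤ e.1) = false := by simpa using hc
          have h3 : decide (s + ((N : Int) + 1) ≤ e.1) = false := by
            rw [decide_eq_false_iff_not]; omega
          rw [h1, h3]; simp

-- membership / nodup of matches
theorem pv_mem_matches (d : PySem.Dict (Int × Int) Int) (os : List (Int × Int))
    (t : ((Int × Int) × Int) × (Int × Int) × Int) :
    t ∈ pvMatches d os ↔
      t.1 ∈ d.items ∧ t.2.1 ∈ os ∧
        d.get? (t.1.1.1 + t.2.1.1, t.1.1.2 + t.2.1.2) = some t.2.2 := by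
  obtain ⟨kv, off, nid⟩ := t
  simp only [pvMatches, List.mem_flatMap, List.mem_filterMap, Option.map_eq_some_iff]
  constructor
  · rintro ⟨kv', hkv', off', hoff', nid', hget, heq⟩
    simp only [Prod.mk.injEq] at heq
    obtain ⟨rfl, rfl, rfl⟩ := heq
    exact ⟨hkv', hoff', hget⟩
  · rintro ⟨h1, h2, h3⟩
    exact ⟨kv, h1, off, h2, nid, h3, rfl⟩

theorem pv_nodup_matches (d : PySem.Dict (Int × Int) Int) (hnd : d.items.Nodup)
    (os : List (Int × Int)) (hos : os.Nodup) : (pvMatches d os).Nodup := by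
  apply pv_nodup_flatMap _ _ hnd
  · intro kv _
    apply List.Nodup.of_map (f := fun t => t.2.1)
    rw [List.map_filterMap]
    simp only [Option.map_map]
    rw [show (fun off => Option.map ((fun t : ((Int × Int) × Int) × (Int × Int) × Int => t.2.1) ∘
        fun nid => (kv, off, nid)) (d.get? (kv.1.1 + off.1, kv.1.2 + off.2)))
      = (fun off => (d.get? (kv.1.1 + off.1, kv.1.2 + off.2)).map (fun _ => off)) from
      funext fun off => by cases d.get? (kv.1.1 + off.1, kv.1.2 + off.2) <;> rfl]
    rw [pv_filterMap_tag]
    exact hos.filter _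
  · intro a _ b _ hab x hxa hxb
    have ha : x.1 = a := by
      rw [List.mem_filterMap] at hxa
      obtain ⟨off, _, h⟩ := hxa
      rw [Option.map_eq_some_iff] at h
      obtain ⟨nid, _, rfl⟩ := h
      rfl
    have hb : x.1 = b := by
      rw [List.mem_filterMap] at hxb
      obtain ⟨off, _, h⟩ := hxb
      rw [Option.map_eq_some_iff] at h
      obtain ⟨nid, _, rfl⟩ := h
      rfl
    exact hab (ha ▸ hb)

theorem pv_flip_flip (t : ((Int × Int) × Int) × (Int × Int) × Int) : pvFlip (pvFlip t) = t := by
  obtain ⟨⟨⟨q, r⟩, v⟩, ⟨dq, dr⟩, nid⟩ := t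
  have h1 : q + dq + -dq = q := by omega
  have h2 : r + dr + -dr = r := by omega
  simp [pvFlip, h1, h2]

theorem pv_keys_nodup (l : List (Int × Int × Int)) : (pvToDict l).keys.Nodup :=
  PySem.Dict.nodup_keys_ofList _

theorem pv_items_nodup (l : List (Int × Int × Int)) : (pvToDict l).items.Nodup :=
  List.Nodup.of_map _ (pv_keys_nodup l)

theorem pv_neg_perm_flip (l : List (Int × Int × Int)) :
    List.Perm (pvMatches (pvToDict l) pvNegOffsets)
      ((pvMatches (pvToDict l) pvHalfOffsets).map pvFlip) := by
  have hk := pv_keys_nodup l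
  rw [List.perm_ext_iff_of_nodup
    (pv_nodup_matches _ (pv_items_nodup l) _ (by decide))
    (List.Nodup.map (Function.Involutive.injective pv_flip_flip)
      (pv_nodup_matches _ (pv_items_nodup l) _ (by decide)))]
  intro t
  have hmap : t ∈ (pvMatches (pvToDict l) pvHalfOffsets).map pvFlip
      ↔ pvFlip t ∈ pvMatches (pvToDict l) pvHalfOffsets := by
    rw [List.mem_map]
    constructor
    · rintro ⟨y, hy, rfl⟩
      rwa [pv_flip_flip]
    · intro h
      exact ⟨pvFlip t, h, pv_flip_flip t⟩
  rw [hmap, pv_mem_matches, pv_mem_matches]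
  obtain ⟨⟨⟨q, r⟩, v⟩, ⟨dq, dr⟩, nid⟩ := t
  simp only [pvFlip]
  constructor
  · rintro ⟨h1, h2, h3⟩
    refine ⟨PySem.Dict.mem_items_of_get?_eq_some _ h3, ?_, ?_⟩
    · simp only [pvNegOffsets, List.mem_cons, List.not_mem_nil, or_false, Prod.mk.injEq] at h2
      simp only [pvHalfOffsets, List.mem_cons, List.not_mem_nil, or_false, Prod.mk.injEq]
      omega
    · have harith : (q + dq + -dq, r + dr + -dr) = (q, r) := by
        simp only [Prod.mk.injEq]; omega
      rw [harith]
      exact PySem.Dict.get?_of_mem_items _ h1 hk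
  · rintro ⟨h1, h2, h3⟩
    have harith : (q + dq + -dq, r + dr + -dr) = (q, r) := by
      simp only [Prod.mk.injEq]; omega
    rw [harith] at h3
    refine ⟨PySem.Dict.mem_items_of_get?_eq_some _ h3, ?_, ?_⟩
    · simp only [pvHalfOffsets, List.mem_cons, List.not_mem_nil, or_false, Prod.mk.injEq] at h2
      simp only [pvNegOffsets, List.mem_cons, List.not_mem_nil, or_false, Prod.mk.injEq]
      omega
    · exact PySem.Dict.get?_of_mem_items _ h1 hk

-- evaluating a flatMap over matches back to a double loop
theorem pv_filterMap_eval (kv : (Int × Int) × Int) (os : List (Int × Int))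
    (o : (Int × Int) → Option Int)
    (F : ((Int × Int) × Int) × (Int × Int) × Int → List Int) :
    (os.filterMap (fun off => (o off).map (fun nid => (kv, off, nid)))).flatMap F
      = os.flatMap (fun off => match o off with
          | some nid => F (kv, off, nid)
          | none => []) := by
  induction os with
  | nil => rfl
  | cons a os ih =>
      rw [List.filterMap_cons, List.flatMap_cons]
      cases h : o a <;> simp [h, ih]

theorem pv_matches_eval (d : PySem.Dict (Int × Int) Int) (os : List (Int × Int))
    (F : ((Int × Int) × Int) × (Int × Int) × Int → List Int) :
    (pvMatches d os).flatMap F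
      = d.items.flatMap (fun kv => os.flatMap (fun off =>
          match d.get? (kv.1.1 + off.1, kv.1.2 + off.2) with
          | some nid => F (kv, off, nid)
          | none => [])) := by
  unfold pvMatches
  rw [List.flatMap_assoc]
  rw [show (fun (kv : (Int × Int) × Int) =>
      (os.filterMap (fun off =>
        (d.get? (kv.1.1 + off.1, kv.1.2 + off.2)).map (fun nid => (kv, off, nid)))).flatMap F)
    = (fun kv => os.flatMap (fun off =>
        match d.get? (kv.1.1 + off.1, kv.1.2 + off.2) with
        | some nid => F (kv, off, nid)
        | none => [])) from
    funext fun kv => pv_filterMap_eval kv os _ F]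

-- a loop over offsets with an id-guard, evaluated
theorem pv_dir_eval (d : PySem.Dict (Int × Int) Int) (kv : (Int × Int) × Int) (n : Int)
    (os : List (Int × Int)) :
    os.flatMap (fun off => match d.get? (kv.1.1 + off.1, kv.1.2 + off.2) with
      | some nid => if kv.2 == n then [nid] else []
      | none => [])
    = if kv.2 == n then os.filterMap (fun off => d.get? (kv.1.1 + off.1, kv.1.2 + off.2)) else [] := by
  induction os with
  | nil => cases kv.2 == n <;> simp
  | cons o os ih =>
      simp only [List.flatMap_cons, List.filterMap_cons]
      cases hh : d.get? (kv.1.1 + o.1, kv.1.2 + o.2) <;> cases hc : kv.2 == n <;>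
        simp_all

theorem pv_split_edge (a b n : Int) :
    (([(a, b), (b, a)] : List (Int × Int)).filter (fun e => e.1 == n)).map (fun e => e.2)
      = (if a == n then [b] else []) ++ (if b == n then [a] else []) := by
  by_cases ha : a = n <;> by_cases hb : b = n <;>
    simp [List.filter_cons, ha, hb]

-- per-item: the filtered, projected edge contribution splits into direct ++ reverse
theorem pv_edgeF_eval (d : PySem.Dict (Int × Int) Int) (n : Int) (kv : (Int × Int) × Int) :
    ((pvEdgeF d kv).filter (fun e => e.1 == n)).map (fun e => e.2)
      = pvHalfOffsets.flatMap (fun off =>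
          (match d.get? (kv.1.1 + off.1, kv.1.2 + off.2) with
            | some nid => if kv.2 == n then [nid] else []
            | none => [])
          ++ (match d.get? (kv.1.1 + off.1, kv.1.2 + off.2) with
            | some nid => if nid == n then [kv.2] else []
            | none => [])) := by
  unfold pvEdgeF
  generalize pvHalfOffsets = os
  induction os with
  | nil => rfl
  | cons o os ih =>
      simp only [List.flatMap_cons, List.filter_append, List.map_append]
      rw [ih]
      congr 1
      cases d.get? (kv.1.1 + o.1, kv.1.2 + o.2) with
      | none => rfl
      | some nid => exact pv_split_edge kv.2 nid n

-- the bucket multisets agree: B's edges with source n are exactly A's gathered ids for n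
theorem pv_bucket_perm (l : List (Int × Int × Int)) (n : Int) :
    List.Perm (((pvEdges (pvToDict l)).filter (fun e => e.1 == n)).map (fun e => e.2))
      (((pvToDict l).items.filter (fun kv => kv.2 == n)).flatMap
          (fun kv => pvGather (pvToDict l) kv.1.1 kv.1.2)) := by
  set d := pvToDict l with hd
  -- left side: split each item's contribution into direct ++ reverse parts
  have hL1 : ((pvEdges d).filter (fun e => e.1 == n)).map (fun e => e.2)
      = d.items.flatMap (fun kv => ((pvEdgeF d kv).filter (fun e => e.1 == n)).map (fun e => e.2)) := by
    rw [pv_edges_eq_flatMap, pv_filter_map_flatMap]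
  have hL2 : List.Perm
      (d.items.flatMap (fun kv => ((pvEdgeF d kv).filter (fun e => e.1 == n)).map (fun e => e.2)))
      (d.items.flatMap (pvDir d n) ++ d.items.flatMap (pvRev d n)) := by
    refine (pv_flatMap_congr_perm _ _ _ (fun kv _ => ?_)).trans
      (pv_flatMap_append_perm d.items (pvDir d n) (pvRev d n))
    rw [pv_edgeF_eval d n kv]
    exact pv_flatMap_append_perm pvHalfOffsets _ _
  -- reverse part equals the negative-offset direct part, via the flip bijection
  have hRev : List.Perm (d.items.flatMap (pvRev d n)) (d.items.flatMap (pvNegDir d n)) := by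
    have h1 : d.items.flatMap (pvRev d n)
        = (pvMatches d pvHalfOffsets).flatMap (fun t => if t.2.2 == n then [t.1.2] else []) := by
      rw [pv_matches_eval]
      rfl
    have h2 : d.items.flatMap (pvNegDir d n)
        = (pvMatches d pvNegOffsets).flatMap (fun t => if t.1.2 == n then [t.2.2] else []) := by
      rw [pv_matches_eval]
      rfl
    rw [h1, h2]
    have h3 : ((pvMatches d pvHalfOffsets).map pvFlip).flatMap
          (fun t => if t.1.2 == n then [t.2.2] else [])
        = (pvMatches d pvHalfOffsets).flatMap (fun t => if t.2.2 == n then [t.1.2] else []) := by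
      rw [List.flatMap_map]
      rfl
    rw [← h3, hd]
    exact ((pv_neg_perm_flip l).flatMap (fun a _ => List.Perm.refl _)).symm
  -- right side: split the six offsets into forward ++ negative ones
  have hR1 : (d.items.filter (fun kv => kv.2 == n)).flatMap (fun kv => pvGather d kv.1.1 kv.1.2)
      = d.items.flatMap (fun kv => if kv.2 == n then pvGather d kv.1.1 kv.1.2 else []) :=
    pv_filter_flatMap _ _ _
  have hsix : List.Perm pvHexNeighbors (pvHalfOffsets ++ pvNegOffsets) := by decide
  have hR2 : ∀ kv : (Int × Int) × Int, List.Perm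
      (if kv.2 == n then pvGather d kv.1.1 kv.1.2 else [])
      (pvDir d n kv ++ pvNegDir d n kv) := by
    intro kv
    rw [pvDir, pvNegDir, pv_dir_eval, pv_dir_eval]
    cases hc : kv.2 == n
    · simp
    · simp only [if_true]
      have : List.Perm (pvGather d kv.1.1 kv.1.2)
          ((pvHalfOffsets ++ pvNegOffsets).filterMap
            (fun off => d.get? (kv.1.1 + off.1, kv.1.2 + off.2))) := by
        exact hsix.filterMap _
      refine this.trans ?_
      rw [List.filterMap_append]
  have hR3 : List.Perm
      (d.items.flatMap (fun kv => if kv.2 == n then pvGather d kv.1.1 kv.1.2 else []))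
      (d.items.flatMap (pvDir d n) ++ d.items.flatMap (pvNegDir d n)) :=
    (pv_flatMap_congr_perm _ _ _ (fun kv _ => hR2 kv)).trans
      (pv_flatMap_append_perm d.items (pvDir d n) (pvNegDir d n))
  rw [hL1, hR1]
  exact (hL2.trans ((List.Perm.refl _).append hRev)).trans hR3.symm

-- all edge endpoints are in range under Pre_
theorem pv_edges_bounded (l : List (Int × Int × Int)) (m : Int)
    (hpre : Pre_build_fast_adjacency_list l m) :
    ∀ e ∈ pvEdges (pvToDict l), 0 ≤ e.1 ∧ e.1 < m := by
  intro e he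
  rw [pv_edges_eq_flatMap, List.mem_flatMap] at he
  obtain ⟨kv, hkv, he⟩ := he
  rw [pvEdgeF, List.mem_flatMap] at he
  obtain ⟨off, hoff, he⟩ := he
  obtain ⟨dq, dr⟩ := off
  cases hget : (pvToDict l).get? (kv.1.1 + dq, kv.1.2 + dr) with
  | none => rw [hget] at he; simp at he
  | some nid =>
    rw [hget] at he
    have hoff' : (dq, dr) = ((1 : Int), (0 : Int)) ∨ (dq, dr) = (1, -1) ∨ (dq, dr) = (0, 1) := by
      simpa [pvHalfOffsets] using hoff
    have hoff6 : (dq, dr) ∈ pvHexNeighbors := by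
      rcases hoff' with h | h | h <;> rw [h] <;> decide
    have hneg6 : ((-dq : Int), (-dr : Int)) ∈ pvHexNeighbors := by
      rcases hoff' with h | h | h <;>
        (injection h with h1 h2; rw [h1, h2]; decide)
    have hkv_b : 0 ≤ kv.2 ∧ kv.2 < m :=
      hpre kv hkv ⟨(dq, dr), hoff6, by
        rw [PySem.Dict.contains_eq_isSome_get?, hget]; rfl⟩
    have hnid_b : 0 ≤ nid ∧ nid < m := by
      apply hpre ((kv.1.1 + dq, kv.1.2 + dr), nid) (PySem.Dict.mem_items_of_get?_eq_some _ hget)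
      refine ⟨(-dq, -dr), hneg6, ?_⟩
      have harith : ((kv.1.1 + dq) + -dq, (kv.1.2 + dr) + -dr) = (kv.1.1, kv.1.2) := by
        simp only [Prod.mk.injEq]; omega
      show (pvToDict l).contains ((kv.1.1 + dq) + -dq, (kv.1.2 + dr) + -dr) = true
      rw [harith, PySem.Dict.contains_eq_isSome_get?,
        PySem.Dict.get?_of_mem_items _ hkv (pv_keys_nodup l)]
      rfl
    simp only [List.mem_cons, List.not_mem_nil, or_false] at he
    rcases he with rfl | rfl
    · exact hkv_b
    · exact hnid_b

-- the precondition gives pv_outer its bucket-bound hypothesis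
theorem pv_hgb (l : List (Int × Int × Int)) (m : Int)
    (hpre : Pre_build_fast_adjacency_list l m) (t : List (List Int))
    (hmt : m ≤ (t.length : Int)) :
    ∀ kv ∈ (pvToDict l).items, pvGather (pvToDict l) kv.1.1 kv.1.2 = [] ∨
      (0 ≤ kv.2 ∧ kv.2 < (t.length : Int)) := by
  intro kv h
  by_cases hg : pvGather (pvToDict l) kv.1.1 kv.1.2 = []
  · exact Or.inl hg
  · right
    have hex : ∃ off ∈ pvHexNeighbors,
        (pvToDict l).contains (kv.1.1 + off.1, kv.1.2 + off.2) = true := by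
      unfold pvGather at hg
      rw [List.filterMap_eq_nil_iff] at hg
      push_neg at hg
      obtain ⟨off, hoff, hne⟩ := hg
      exact ⟨off, hoff, by
        rw [PySem.Dict.contains_eq_isSome_get?]
        exact Option.isSome_iff_ne_none.mpr hne⟩
    have := hpre kv h hex
    omega

-- ===== VERDICT (by name: the statement is the Claim_ definition above) =====
theorem build_fast_adjacency_list_spec : Claim_equal_build_fast_adjacency_list := by
  unfold Claim_equal_build_fast_adjacency_list
  intro l m _ hpre
  unfold Spec_build_fast_adjacency_list
  unfold build_fast_adjacency_list build_fast_adjacency_list_alt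
  set d := pvToDict l with hd
  by_cases hm : 0 ≤ m
  case neg =>
    rw [PySem.List.pyRange_one_eq_nil (by omega)]
    simp only [List.map_nil, List.foldl_nil]
    obtain ⟨hlen, _⟩ := pv_outer d d.items [] (by rw [hd]; exact pv_hgb l m hpre [] (by simp; omega))
    simp only [List.length_nil] at hlen
    rw [List.length_eq_zero_iff] at hlen
    rw [hlen]
    rfl
  case pos =>
    set N := m.toNat with hN
    have hmN : m = ((N : Nat) : Int) := by omega
    -- A side
    have hgb := pv_hgb l m hpre (List.replicate N []) (by simp; omega)
    rw [← hd] at hgb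
    obtain ⟨hlenA, hvalA⟩ := pv_outer d d.items (List.replicate N []) hgb
    simp only [List.length_replicate] at hlenA
    have hinit : ((PySem.List.pyRange 0 m 1).map (fun _ => ([] : List Int)))
        = List.replicate N [] := by
      rw [List.map_const']
      simp only [PySem.List.length_pyRange_one, Int.sub_zero, hN]
    rw [hinit]
    -- B side
    have hp : (PySem.List.sorted (pvEdges d) (fun e => e.1) false).Pairwise
        (fun a b => a.1 ≤ b.1) := PySem.List.sorted_pairwise (pvEdges d) (fun e => e.1)
    have hlow : ∀ e ∈ PySem.List.sorted (pvEdges d) (fun e => e.1) false, (0 : Int) ≤ e.1 :=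
      fun e he => (pv_edges_bounded l m hpre e
        ((PySem.List.mem_sorted _ _ _ _).mp he)).1
    have hscan := pv_scan N 0 (PySem.List.sorted (pvEdges d) (fun e => e.1) false) hp hlow []
    rw [show (0 : Int) + (N : Int) = m from by omega] at hscan
    rw [hscan]
    simp only [List.nil_append]
    -- compare elementwise
    apply List.ext_getElem?
    intro n
    by_cases hn : n < N
    · rw [List.getElem?_map, hvalA n (by simpa using hn), List.getElem?_map,
        List.getElem?_range hn]
      simp only [Option.map_some]
      congr 1
      have hgd : (List.replicate N ([] : List Int)).getD n [] = [] := by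
        simp [List.getD_eq_getElem?_getD, List.getElem?_replicate, hn]
      rw [hgd, List.nil_append]
      apply (PySem.List.sorted_id_eq_sorted_id_iff_perm _ _).mpr
      refine List.Perm.symm ?_
      have hse : List.Perm
          ((List.filter (fun e => e.1 == 0 + (n : Int))
            (PySem.List.sorted (pvEdges d) (fun e => e.1) false)).map (fun e => e.2))
          (((pvEdges d).filter (fun e => e.1 == 0 + (n : Int))).map (fun e => e.2)) :=
        (((PySem.List.sorted_perm (pvEdges d) (fun e => e.1) false).filter _).map _)
      refine hse.trans ?_
      simp only [zero_add]
      rw [hd]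
      exact pv_bucket_perm l (n : Int)
    · rw [List.getElem?_eq_none (by simp only [List.length_map, hlenA]; omega),
        List.getElem?_eq_none (by simp; omega)]
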